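-- pv_equiv track=rewrite | github.com/medalahonor/film_bot | src/api/routers/votes.py | _find_slot_result
-- ===== SOURCE A (Python) =====
-- from typing import List, Optional
--
-- def _find_slot_result(
--     vote_rows: list,
--     slot_movie_ids: list[int],
-- ) -> tuple[Optional[int], list[int]]:
--     """Returns (winner_id or None, runoff_ids).
--
--     winner_id is set when there is a clear winner.
--     runoff_ids is set when multiple movies are tied at the top.
--     If slot is empty — returns (None, []).
--     If slot has one movie — that movie wins by default.
--     """
--     if not slot_movie_ids:
--         return None, []
--     if len(slot_movie_ids) == 1:
--         return slot_movie_ids[0], []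
--
--     counts = {row[0]: row[1] for row in vote_rows}
--     all_counts = [(mid, counts.get(mid, 0)) for mid in slot_movie_ids]
--     max_count = max(c for _, c in all_counts)
--     top = [mid for mid, c in all_counts if c == max_count]
--
--     if len(top) == 1:
--         return top[0], []
--     return None, top
-- ===== SOURCE B (Python) =====
-- from typing import List, Optional
--
-- def _find_slot_result(
--     vote_rows: list,
--     slot_movie_ids: list,
-- ):
--     if not slot_movie_ids:
--         return None, []
--     if len(slot_movie_ids) == 1:
--         return slot_movie_ids[0], []
--
--     counts = {row[0]: row[1] for row in vote_rows}
--     best = counts.get(slot_movie_ids[0], 0)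
--     top = [slot_movie_ids[0]]
--     for mid in slot_movie_ids[1:]:
--         c = counts.get(mid, 0)
--         if c > best:
--             best = c
--             top = [mid]
--         elif c == best:
--             top.append(mid)
--
--     if len(top) == 1:
--         return top[0], []
--     return None, top
-- ===== Notes on version B (the rewrite author's own statement) =====
-- stated objective: alternative
-- what changed: Replaces the three sequential passes over slot_movie_ids (build the all_counts pair list, take max over it, filter it for the max) by one incremental pass that maintains a running best count and the current list of tied leaders.
import Mathlib
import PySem

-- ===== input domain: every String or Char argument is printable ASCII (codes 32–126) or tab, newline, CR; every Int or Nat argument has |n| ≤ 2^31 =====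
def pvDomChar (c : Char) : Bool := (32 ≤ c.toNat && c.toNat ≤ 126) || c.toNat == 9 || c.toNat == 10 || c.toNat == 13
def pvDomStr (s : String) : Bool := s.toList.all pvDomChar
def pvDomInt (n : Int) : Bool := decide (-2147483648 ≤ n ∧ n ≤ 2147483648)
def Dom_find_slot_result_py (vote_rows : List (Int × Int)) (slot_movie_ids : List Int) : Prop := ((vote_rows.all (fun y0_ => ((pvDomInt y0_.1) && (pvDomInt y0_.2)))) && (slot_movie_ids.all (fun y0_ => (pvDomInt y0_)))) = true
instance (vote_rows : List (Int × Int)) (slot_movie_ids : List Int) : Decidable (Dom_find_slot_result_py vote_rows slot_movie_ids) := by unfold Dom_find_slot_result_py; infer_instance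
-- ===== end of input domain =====

-- B replaces A's three passes (pair list, max, filter) by one incremental pass keeping a running best and tied-leader list; same output everywhere.

-- ===== PORT A =====
def find_slot_result_py (vote_rows : List (Int × Int)) (slot_movie_ids : List Int) : Option Int × List Int :=
  if slot_movie_ids = [] then (none, [])
  else if slot_movie_ids.length = 1 then (some (PySem.List.pyGetD slot_movie_ids 0 0), [])
  else
    let counts : PySem.Dict Int Int := vote_rows.foldl (fun d row => d.insert row.1 row.2) PySem.Dict.empty
    let all_counts : List (Int × Int) := slot_movie_ids.map (fun mid => (mid, counts.getD mid 0))
    match PySem.List.max? (all_counts.map (·.2)) (fun c => c) with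
    | none => (none, [])  -- unreachable: slot_movie_ids ≠ [] here; Python's max would raise only on the empty list
    | some max_count =>
      let top : List Int := (all_counts.filter (fun p => p.2 == max_count)).map (·.1)
      if top.length = 1 then (some (PySem.List.pyGetD top 0 0), [])
      else (none, top)

-- ===== PORT B =====
def altLoop (counts : PySem.Dict Int Int) (best : Int) (top : List Int) : List Int → Int × List Int
  | [] => (best, top)
  | m :: rest =>
    let c := counts.getD m 0
    if best < c then altLoop counts c [m] rest
    else if c = best then altLoop counts best (top ++ [m]) rest
    else altLoop counts best top rest

def find_slot_result_py_alt (vote_rows : List (Int × Int)) (slot_movie_ids : List Int) : Option Int × List Int :=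
  match slot_movie_ids with
  | [] => (none, [])
  | [m] => (some m, [])
  | m :: rest =>
    let counts : PySem.Dict Int Int := vote_rows.foldl (fun d row => d.insert row.1 row.2) PySem.Dict.empty
    let r := altLoop counts (counts.getD m 0) [m] rest
    match r.2 with
    | [w] => (some w, [])
    | top => (none, top)

-- ===== PRECONDITION & SPEC =====
def Spec_find_slot_result_py (vote_rows : List (Int × Int)) (slot_movie_ids : List Int) (out : Option Int × List Int) : Prop := out = find_slot_result_py_alt vote_rows slot_movie_ids
instance (vote_rows : List (Int × Int)) (slot_movie_ids : List Int) (out : Option Int × List Int) : Decidable (Spec_find_slot_result_py vote_rows slot_movie_ids out) := by unfold Spec_find_slot_result_py; infer_instance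

-- ===== CLAIM (what is proved, stated in full; the proofs are below) =====
def Claim_equal_find_slot_result_py : Prop := ∀ (vote_rows : List (Int × Int)) (slot_movie_ids : List Int), Dom_find_slot_result_py vote_rows slot_movie_ids → Spec_find_slot_result_py vote_rows slot_movie_ids (find_slot_result_py vote_rows slot_movie_ids)

-- ===== LEMMAS AND PROOFS =====

-- B's loop computes the running maximum and the list of tied leaders of the processed prefix.
theorem altLoop_spec (counts : PySem.Dict Int Int) :
    ∀ (l : List Int) (best : Int) (top : List Int),
      altLoop counts best top l =
        (l.foldl (fun a m => max a (counts.getD m 0)) best,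
         (if l.foldl (fun a m => max a (counts.getD m 0)) best = best then top else [])
           ++ l.filter (fun m => counts.getD m 0 == l.foldl (fun a m => max a (counts.getD m 0)) best)) := by
  intro l
  induction l with
  | nil => intro best top; simp [altLoop]
  | cons m rest ih =>
    intro best top
    have hle : ∀ (b : Int), b ≤ rest.foldl (fun a m => max a (counts.getD m 0)) b := by
      intro b
      have := (PySem.List.le_foldl_max (rest.map (fun m => counts.getD m 0)) b).1
      simpa [List.foldl_map] using this
    simp only [altLoop, List.foldl_cons, List.filter_cons]
    by_cases h1 : best < counts.getD m 0
    · have hmax : max best (counts.getD m 0) = counts.getD m 0 := by omega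
      rw [if_pos h1, ih]
      simp only [hmax]
      have hge := hle (counts.getD m 0)
      set M := rest.foldl (fun a m => max a (counts.getD m 0)) (counts.getD m 0) with hM
      have hMb : ¬ M = best := by omega
      rw [if_neg hMb]
      by_cases h2 : M = counts.getD m 0
      · simp [h2]
      · have : ¬ (counts.getD m 0 == M) = true := by simp; omega
        simp [h2, this]
    · rw [if_neg h1]
      by_cases h2 : counts.getD m 0 = best
      · rw [if_pos h2, ih]
        have hmax : max best (counts.getD m 0) = best := by omega
        simp only [hmax]
        have hge := hle best
        set M := rest.foldl (fun a m => max a (counts.getD m 0)) best with hM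
        by_cases h3 : M = best
        · have : (counts.getD m 0 == M) = true := by simp; omega
          simp [h3, h2]
        · have : ¬ (counts.getD m 0 == M) = true := by simp; omega
          simp [h3, this]
      · rw [if_neg h2, ih]
        have hmax : max best (counts.getD m 0) = best := by omega
        simp only [hmax]
        have hge := hle best
        set M := rest.foldl (fun a m => max a (counts.getD m 0)) best with hM
        have : ¬ (counts.getD m 0 == M) = true := by simp; omega
        simp [this]

-- filtering the (mid, count) pairs for the max then projecting = filtering the ids directly
theorem filter_map_fst (counts : PySem.Dict Int Int) (M : Int) :
    ∀ (l : List Int),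
      ((l.map (fun mid => (mid, counts.getD mid 0))).filter (fun p => p.2 == M)).map (·.1)
        = l.filter (fun m => counts.getD m 0 == M) := by
  intro l
  induction l with
  | nil => rfl
  | cons m rest ih =>
    simp only [List.map_cons, List.filter_cons]
    by_cases h : (counts.getD m 0 == M) = true
    · simp [h, ih]
    · simp [h, ih]

-- ===== VERDICT (by name: the statement is the Claim_ definition above) =====
theorem find_slot_result_py_spec : Claim_equal_find_slot_result_py := by
  intro vote_rows slot_movie_ids _
  show find_slot_result_py vote_rows slot_movie_ids = find_slot_result_py_alt vote_rows slot_movie_ids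
  match slot_movie_ids with
  | [] => rfl
  | [m] => simp [find_slot_result_py, find_slot_result_py_alt, PySem.List.pyGetD]
  | m0 :: m1 :: rest =>
    set counts : PySem.Dict Int Int := vote_rows.foldl (fun d row => d.insert row.1 row.2) PySem.Dict.empty with hcounts
    have hmax : PySem.List.max?
        (((m0 :: m1 :: rest).map (fun mid => (mid, counts.getD mid 0))).map (·.2)) (fun c => c)
        = some ((m1 :: rest).foldl (fun a m => max a (counts.getD m 0)) (counts.getD m0 0)) := by
      rw [show (((m0 :: m1 :: rest).map (fun mid => (mid, counts.getD mid 0))).map (·.2))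
            = counts.getD m0 0 :: (m1 :: rest).map (fun m => counts.getD m 0) by simp [List.map_map]]
      rw [PySem.List.max?_id_cons]
      rw [List.foldl_map]
    set M := (m1 :: rest).foldl (fun a m => max a (counts.getD m 0)) (counts.getD m0 0) with hM
    have hMge : counts.getD m0 0 ≤ M := by
      have := (PySem.List.le_foldl_max ((m1 :: rest).map (fun m => counts.getD m 0)) (counts.getD m0 0)).1
      simpa [List.foldl_map, ← hM] using this
    have hB := altLoop_spec counts (m1 :: rest) (counts.getD m0 0) [m0]
    rw [← hM] at hB
    have htop : (((m0 :: m1 :: rest).map (fun mid => (mid, counts.getD mid 0))).filter (fun p => p.2 == M)).map (·.1)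
          = (altLoop counts (counts.getD m0 0) [m0] (m1 :: rest)).2 := by
      rw [filter_map_fst, hB]
      simp only [List.filter_cons]
      by_cases h : M = counts.getD m0 0
      · simp [h]
      · have hne : ¬ (counts.getD m0 0 == M) = true := by simp; omega
        simp [h, hne]
    -- unfold both sides
    show find_slot_result_py vote_rows (m0 :: m1 :: rest) = find_slot_result_py_alt vote_rows (m0 :: m1 :: rest)
    simp only [find_slot_result_py, find_slot_result_py_alt]
    rw [if_neg (by simp), if_neg (by simp), ← hcounts, hmax]
    dsimp only
    rw [htop]
    rcases h : (altLoop counts (counts.getD m0 0) [m0] (m1 :: rest)).2 with _ | ⟨w, _ | ⟨x, t⟩⟩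
    · simp
    · simp [PySem.List.pyGetD]
    · simp
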